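-- pv_equiv track=rewrite | github.com/kpercyro/MSE-433---Module-3-Warehousing | manjary/policies.py | queues_lpt_balance
-- ===== SOURCE A (Python) =====
-- from typing import Dict, List, Tuple
--
-- def ototal(d: Dict[int, int]) -> int:
--     return sum(int(v) for v in d.values())
--
-- def queues_lpt_balance(demands: List[Dict[int, int]], num_belts: int = 4) -> Tuple[List[List[int]], List[int]]:
--     """
--     LPT (largest processing time first) assignment to least-loaded belt.
--     'Processing time' approximated by total number of items in the order.
--     """
--     sizes = sorted([(ototal(d), i) for i, d in enumerate(demands)], reverse=True)
--     qs = [[] for _ in range(num_belts)]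
--     load = [0] * num_belts
--
--     for sz, oi in sizes:
--         b = min(range(num_belts), key=lambda x: load[x])
--         qs[b].append(oi)
--         load[b] += sz
--
--     return qs, load
-- ===== SOURCE B (Python) =====
-- from typing import Dict, List, Tuple
--
-- def ototal(d: Dict[int, int]) -> int:
--     return sum(int(v) for v in d.values())
--
-- def queues_lpt_balance(demands: List[Dict[int, int]], num_belts: int = 4) -> Tuple[List[List[int]], List[int]]:
--     """LPT assignment: keep the belts in a pool kept sorted by (load, belt index);
--     take the head instead of re-scanning all belts with min() each iteration."""
--     sizes = sorted([(ototal(d), i) for i, d in enumerate(demands)], reverse=True)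
--     qs = [[] for _ in range(num_belts)]
--     load = [0] * num_belts
--     pool = [(0, b) for b in range(num_belts)]  # ascending by (load, belt)
--
--     for sz, oi in sizes:
--         curload, b = pool.pop(0)
--         qs[b].append(oi)
--         load[b] += sz
--         item = (curload + sz, b)
--         j = 0
--         while j < len(pool) and pool[j] < item:
--             j += 1
--         pool.insert(j, item)
--
--     return qs, load
-- ===== Notes on version B (the rewrite author's own statement) =====
-- stated objective: alternative
-- what changed: Replaces the per-order min()-rescan of all belts by a pool of (load, belt) pairs kept sorted ascending: each order pops the head (least-loaded, lowest-index belt) and re-inserts the updated pair at its sorted position.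
import Mathlib
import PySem

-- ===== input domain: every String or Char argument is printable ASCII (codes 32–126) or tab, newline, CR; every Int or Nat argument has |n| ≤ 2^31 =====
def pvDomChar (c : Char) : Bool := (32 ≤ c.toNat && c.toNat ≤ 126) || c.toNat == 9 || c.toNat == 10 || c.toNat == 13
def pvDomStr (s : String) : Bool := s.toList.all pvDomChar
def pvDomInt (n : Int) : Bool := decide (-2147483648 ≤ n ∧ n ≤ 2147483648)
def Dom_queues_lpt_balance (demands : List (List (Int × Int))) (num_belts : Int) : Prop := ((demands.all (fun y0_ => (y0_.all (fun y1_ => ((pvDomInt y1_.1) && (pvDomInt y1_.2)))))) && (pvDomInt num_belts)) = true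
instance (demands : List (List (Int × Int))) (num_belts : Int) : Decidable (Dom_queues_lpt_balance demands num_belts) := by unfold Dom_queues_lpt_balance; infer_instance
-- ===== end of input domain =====

-- B replaces the per-order min() rescan of the belts by a pool of (load, belt) pairs kept
-- sorted ascending (pop the head, re-insert the updated pair at its sorted position);
-- objective: alternative data structure, same results.

-- ===== PORT A =====
-- ototal(d): sum(int(v) for v in d.values()); the dict argument arrives as an assoc list.
def pvOtotal (d : List (Int × Int)) : Int :=
  (PySem.Dict.ofList d).values.foldl (fun acc v => acc + v) 0

-- the loop body: b = min(range(num_belts), key=lambda x: load[x]); qs[b].append(oi); load[b] += sz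
-- (none = ValueError on an empty range, excluded by Pre_)
def pvStepA (num_belts : Int) (st : List (List Int) × List Int) (p : Int × Int) :
    List (List Int) × List Int :=
  match PySem.List.min? (PySem.List.pyRange 0 num_belts 1) (fun x => PySem.List.pyGetD st.2 x 0) with
  | none => st
  | some b =>
      (PySem.List.pySetD st.1 b (PySem.List.pyGetD st.1 b [] ++ [p.2]),
       PySem.List.pySetD st.2 b (PySem.List.pyGetD st.2 b 0 + p.1))

def queues_lpt_balance (demands : List (List (Int × Int))) (num_belts : Int) : List (List Int) × List Int :=
  let sizes := PySem.List.sorted2 ((PySem.List.enumerate demands 0).map (fun p => (pvOtotal p.2, p.1)))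
      (fun x => x.1) (fun x => x.2) true
  let qs : List (List Int) := (PySem.List.pyRange 0 num_belts 1).map (fun _ => [])
  let load : List Int := PySem.List.pyRepeat [0] num_belts
  sizes.foldl (pvStepA num_belts) (qs, load)

-- ===== PORT B =====
-- Python tuple '<' on (int, int) pairs
def pvLtPair (a b : Int × Int) : Bool := a.1 < b.1 || (a.1 == b.1 && a.2 < b.2)

-- the while-loop + pool.insert(j, item) of Source B: insert before the first element not < item
def pvInsPool (item : Int × Int) : List (Int × Int) → List (Int × Int)
  | [] => [item]
  | p :: rest => if pvLtPair p item then p :: pvInsPool item rest else item :: p :: rest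

-- the loop body: curload, b = pool.pop(0); qs[b].append(oi); load[b] += sz; sorted re-insert
-- ([] = IndexError on an empty pool, excluded by Pre_)
def pvStepB (st : List (List Int) × List Int × List (Int × Int)) (p : Int × Int) :
    List (List Int) × List Int × List (Int × Int) :=
  match st.2.2 with
  | [] => st
  | (curload, b) :: rest =>
      (PySem.List.pySetD st.1 b (PySem.List.pyGetD st.1 b [] ++ [p.2]),
       PySem.List.pySetD st.2.1 b (PySem.List.pyGetD st.2.1 b 0 + p.1),
       pvInsPool (curload + p.1, b) rest)

def queues_lpt_balance_alt (demands : List (List (Int × Int))) (num_belts : Int) : List (List Int) × List Int :=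
  let sizes := PySem.List.sorted2 ((PySem.List.enumerate demands 0).map (fun p => (pvOtotal p.2, p.1)))
      (fun x => x.1) (fun x => x.2) true
  let qs : List (List Int) := (PySem.List.pyRange 0 num_belts 1).map (fun _ => [])
  let load : List Int := PySem.List.pyRepeat [0] num_belts
  let pool : List (Int × Int) := (PySem.List.pyRange 0 num_belts 1).map (fun b => (0, b))
  let st := sizes.foldl pvStepB (qs, load, pool)
  (st.1, st.2.1)

-- ===== PRECONDITION & SPEC =====
-- Pre_ excludes num_belts ≤ 0 with a nonempty demands list: there A's min() over the empty
-- belt range raises ValueError (and B's pool.pop(0) raises IndexError).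
def Pre_queues_lpt_balance (demands : List (List (Int × Int))) (num_belts : Int) : Prop :=
  demands = [] ∨ 0 < num_belts
instance (demands : List (List (Int × Int))) (num_belts : Int) : Decidable (Pre_queues_lpt_balance demands num_belts) := by
  unfold Pre_queues_lpt_balance; infer_instance

def pvWitness_queues_lpt_balance : (List (List (Int × Int))) × Int := ([[(1, 2), (3, 4)], [(5, 6)]], 4)

def Spec_queues_lpt_balance (demands : List (List (Int × Int))) (num_belts : Int) (out : List (List Int) × List Int) : Prop := out = queues_lpt_balance_alt demands num_belts
instance (demands : List (List (Int × Int))) (num_belts : Int) (out : List (List Int) × List Int) : Decidable (Spec_queues_lpt_balance demands num_belts out) := by unfold Spec_queues_lpt_balance; infer_instance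

-- ===== CLAIM (what is proved, stated in full; the proofs are below) =====
def Claim_equal_queues_lpt_balance : Prop := ∀ (demands : List (List (Int × Int))) (num_belts : Int), Dom_queues_lpt_balance demands num_belts → Pre_queues_lpt_balance demands num_belts → Spec_queues_lpt_balance demands num_belts (queues_lpt_balance demands num_belts)

-- ===== LEMMAS AND PROOFS =====

-- strict lexicographic order on (load, belt) pairs, the Prop form of pvLtPair
def pvRel (a b : Int × Int) : Prop := a.1 < b.1 ∨ (a.1 = b.1 ∧ a.2 < b.2)

theorem pvLtPair_iff (a b : Int × Int) : pvLtPair a b = true ↔ pvRel a b := by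
  simp [pvLtPair, pvRel]

theorem pvRel_trans {a b c : Int × Int} (h1 : pvRel a b) (h2 : pvRel b c) : pvRel a c := by
  unfold pvRel at *; omega

theorem pvRel_total_of_ne {a b : Int × Int} (h : ¬ pvRel a b) (hne : a.2 ≠ b.2) : pvRel b a := by
  unfold pvRel at *; omega

theorem pvInsPool_perm (item : Int × Int) (ys : List (Int × Int)) :
    (pvInsPool item ys).Perm (item :: ys) := by
  induction ys with
  | nil => simp [pvInsPool]
  | cons p t ih =>
      unfold pvInsPool
      by_cases h : pvLtPair p item = true
      · simp only [h, if_true]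
        exact (ih.cons p).trans (List.Perm.swap item p t)
      · simp [h]

theorem mem_pvInsPool {x item : Int × Int} {ys : List (Int × Int)} :
    x ∈ pvInsPool item ys ↔ x = item ∨ x ∈ ys := by
  rw [(pvInsPool_perm item ys).mem_iff, List.mem_cons]

theorem pvInsPool_pairwise {item : Int × Int} {ys : List (Int × Int)}
    (hs : ys.Pairwise pvRel) (hne : ∀ p ∈ ys, p.2 ≠ item.2) :
    (pvInsPool item ys).Pairwise pvRel := by
  induction ys with
  | nil => simp [pvInsPool]
  | cons p t ih =>
      rcases List.pairwise_cons.mp hs with ⟨hpt, ht⟩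
      unfold pvInsPool
      by_cases h : pvLtPair p item = true
      · simp only [h, if_true]
        refine List.pairwise_cons.mpr ⟨?_, ih ht (fun q hq => hne q (List.mem_cons_of_mem _ hq))⟩
        intro q hq
        rcases mem_pvInsPool.mp hq with rfl | hq'
        · exact (pvLtPair_iff _ _).mp h
        · exact hpt q hq'
      · simp only [h, Bool.false_eq_true, if_false]
        have hip : pvRel item p :=
          pvRel_total_of_ne (fun hc => h ((pvLtPair_iff _ _).mpr hc))
            (hne p List.mem_cons_self)
        refine List.pairwise_cons.mpr ⟨?_, hs⟩
        intro q hq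
        rcases List.mem_cons.mp hq with rfl | hq'
        · exact hip
        · exact pvRel_trans hip (hpt q hq')

-- the foldl body of PySem.List.min? (definitionally equal; see pv_min?_foldl)
def pvMinStep (key : Int → Int) (acc : Option Int) (x : Int) : Option Int :=
  match acc with
  | none => some x
  | some m => if key x < key m then some x else some m

theorem pv_min?_foldl (xs : List Int) (key : Int → Int) :
    PySem.List.min? xs key = xs.foldl (pvMinStep key) none := by
  unfold PySem.List.min?
  congr 1
  funext acc x
  cases acc <;> rfl

theorem pv_foldl_min_keep (t : List Int) (key : Int → Int) (m : Int)
    (h : ∀ y ∈ t, ¬ key y < key m) :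
    t.foldl (pvMinStep key) (some m) = some m := by
  induction t with
  | nil => rfl
  | cons y t ih =>
      simp only [List.foldl_cons, pvMinStep]
      rw [if_neg (h y List.mem_cons_self)]
      exact ih (fun z hz => h z (List.mem_cons_of_mem _ hz))

theorem pv_foldl_min_first (t : List Int) (key : Int → Int) (b : Int) :
    ∀ m : Int, b ∈ t → key b < key m → (∀ y ∈ t, key b ≤ key y) →
    (∀ y ∈ t, key y = key b → b ≤ y) → t.Pairwise (· < ·) →
    t.foldl (pvMinStep key) (some m) = some b := by
  induction t with
  | nil => intro m hmem; exact absurd hmem (List.not_mem_nil)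
  | cons y t ih =>
      intro m hmem hlt hmin hfirst hsorted
      rcases List.pairwise_cons.mp hsorted with ⟨hy, ht⟩
      simp only [List.foldl_cons, pvMinStep]
      rcases List.mem_cons.mp hmem with rfl | hb
      · rw [if_pos hlt]
        exact pv_foldl_min_keep t key b
          (fun z hz => not_lt.mpr (hmin z (List.mem_cons_of_mem _ hz)))
      · have hby : key b < key y := by
          rcases lt_or_eq_of_le (hmin y List.mem_cons_self) with h | h
          · exact h
          · exact absurd (hfirst y List.mem_cons_self h.symm) (not_le.mpr (hy b hb))
        by_cases hc : key y < key m
        · rw [if_pos hc]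
          exact ih y hb hby (fun z hz => hmin z (List.mem_cons_of_mem _ hz))
            (fun z hz hez => hfirst z (List.mem_cons_of_mem _ hz) hez) ht
        · rw [if_neg hc]
          exact ih m hb hlt (fun z hz => hmin z (List.mem_cons_of_mem _ hz))
            (fun z hz hez => hfirst z (List.mem_cons_of_mem _ hz) hez) ht

theorem pv_min?_eq (xs : List Int) (key : Int → Int) (b : Int)
    (hmem : b ∈ xs) (hsorted : xs.Pairwise (· < ·))
    (hmin : ∀ x ∈ xs, key b ≤ key x) (hfirst : ∀ x ∈ xs, key x = key b → b ≤ x) :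
    PySem.List.min? xs key = some b := by
  cases xs with
  | nil => exact absurd hmem (List.not_mem_nil)
  | cons x t =>
      rcases List.pairwise_cons.mp hsorted with ⟨hx, ht⟩
      rw [pv_min?_foldl]
      simp only [List.foldl_cons, pvMinStep]
      rcases List.mem_cons.mp hmem with rfl | hb
      · exact pv_foldl_min_keep t key b
          (fun z hz => not_lt.mpr (hmin z (List.mem_cons_of_mem _ hz)))
      · have hbx : key b < key x := by
          rcases lt_or_eq_of_le (hmin x List.mem_cons_self) with h | h
          · exact h
          · exact absurd (hfirst x List.mem_cons_self h.symm) (not_le.mpr (hx b hb))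
        exact pv_foldl_min_first t key b x hb hbx
          (fun z hz => hmin z (List.mem_cons_of_mem _ hz))
          (fun z hz hez => hfirst z (List.mem_cons_of_mem _ hz) hez) ht

-- the (load, belt) pairs of all belts, in belt order
def pvPairs (load : List Int) (n : Int) : List (Int × Int) :=
  (PySem.List.pyRange 0 n 1).map (fun b => (PySem.List.pyGetD load b 0, b))

def pvInv (load : List Int) (n : Int) (pool : List (Int × Int)) : Prop :=
  pool.Pairwise pvRel ∧ pool.Perm (pvPairs load n)

theorem pvPairs_length (load : List Int) (n : Int) : (pvPairs load n).length = (n - 0).toNat := by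
  simp [pvPairs, PySem.List.length_pyRange_one]

theorem map_snd_pvPairs (load : List Int) (n : Int) :
    (pvPairs load n).map (fun q => q.2) = PySem.List.pyRange 0 n 1 := by
  simp [pvPairs, List.map_map, Function.comp_def]

-- everything the loop step needs about popping the head of the sorted pool
theorem pv_step (n : Int) (hn : 0 < n) (load : List Int) (hlen : load.length = n.toNat)
    (c b : Int) (rest : List (Int × Int)) (hinv : pvInv load n ((c, b) :: rest)) (sz : Int) :
    PySem.List.min? (PySem.List.pyRange 0 n 1) (fun x => PySem.List.pyGetD load x 0) = some b
    ∧ c = PySem.List.pyGetD load b 0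
    ∧ (PySem.List.pySetD load b (PySem.List.pyGetD load b 0 + sz)).length = n.toNat
    ∧ pvInv (PySem.List.pySetD load b (PySem.List.pyGetD load b 0 + sz)) n
        (pvInsPool (c + sz, b) rest) := by
  obtain ⟨hpw, hperm⟩ := hinv
  -- the head is one of the (load, belt) pairs
  have hmem : (c, b) ∈ pvPairs load n := hperm.subset List.mem_cons_self
  obtain ⟨b', hb'r, hb'e⟩ := List.mem_map.mp hmem
  obtain ⟨hb0, hbn⟩ := PySem.List.mem_pyRange_one.mp hb'r
  have hbb : b = b' := (congrArg Prod.snd hb'e).symm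
  subst hbb
  have hc : c = PySem.List.pyGetD load b 0 := (congrArg Prod.fst hb'e).symm
  have hbr : b ∈ PySem.List.pyRange 0 n 1 := hb'r
  -- the head is pvRel-below every other pair
  have hhead : ∀ q ∈ pvPairs load n, q = (c, b) ∨ pvRel (c, b) q := by
    intro q hq
    rcases List.mem_cons.mp (hperm.symm.subset hq) with h | h
    · exact Or.inl h
    · exact Or.inr (List.rel_of_pairwise_cons hpw h)
  have hmin : ∀ x ∈ PySem.List.pyRange 0 n 1,
      PySem.List.pyGetD load b 0 ≤ PySem.List.pyGetD load x 0 := by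
    intro x hx
    have hqx : (PySem.List.pyGetD load x 0, x) ∈ pvPairs load n := List.mem_map_of_mem hx
    rcases hhead _ hqx with h | h
    · have h1 : PySem.List.pyGetD load x 0 = c := congrArg Prod.fst h
      omega
    · simp only [pvRel] at h
      omega
  have hfirst : ∀ x ∈ PySem.List.pyRange 0 n 1,
      PySem.List.pyGetD load x 0 = PySem.List.pyGetD load b 0 → b ≤ x := by
    intro x hx he
    have hqx : (PySem.List.pyGetD load x 0, x) ∈ pvPairs load n := List.mem_map_of_mem hx
    rcases hhead _ hqx with h | h
    · have h1 : x = b := congrArg Prod.snd h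
      omega
    · simp only [pvRel] at h
      omega
  have hminr : PySem.List.min? (PySem.List.pyRange 0 n 1)
      (fun x => PySem.List.pyGetD load x 0) = some b :=
    pv_min?_eq _ _ b hbr (PySem.List.pairwise_lt_pyRange_one 0 n) hmin hfirst
  -- second components of the rest differ from b
  have hsndnd : ((( c, b) :: rest).map (fun q => q.2)).Nodup := by
    rw [(hperm.map (fun q => q.2)).nodup_iff, map_snd_pvPairs]
    exact PySem.List.nodup_pyRange_one 0 n
  have hne : ∀ p ∈ rest, p.2 ≠ b := by
    intro p hp he
    have : (b : Int) ∉ rest.map (fun q => q.2) := by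
      simpa using (List.nodup_cons.mp hsndnd).1
    exact this (he ▸ List.mem_map_of_mem hp)
  -- the updated load list
  set v := PySem.List.pyGetD load b 0 + sz with hv
  have hset : PySem.List.pySetD load b v = load.set b.toNat v :=
    PySem.List.pySetD_of_nonneg load v hb0
  have hlen' : (PySem.List.pySetD load b v).length = n.toNat := by
    rw [hset, List.length_set, hlen]
  have hget' : ∀ x : Int, 0 ≤ x → x < n →
      PySem.List.pyGetD (PySem.List.pySetD load b v) x 0 =
        if x = b then v else PySem.List.pyGetD load x 0 := by
    intro x hx0 hxn
    rw [hset]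
    have hxlt : x < ((load.set b.toNat v).length : Int) := by
      rw [List.length_set, hlen]; omega
    rw [PySem.List.pyGetD_eq_getElem _ _ hx0 hxlt]
    by_cases hxb : x = b
    · subst hxb
      rw [if_pos rfl, List.getElem_set, if_pos rfl]
    · rw [if_neg hxb, List.getElem_set_ne (by omega),
        ← PySem.List.pyGetD_eq_getElem load 0 hx0 (by rw [hlen]; omega)]
  -- split the belt range at b
  have hsplit : PySem.List.pyRange 0 n 1 =
      PySem.List.pyRange 0 b 1 ++ b :: PySem.List.pyRange (b + 1) n 1 := by
    rw [PySem.List.pyRange_one_append 0 b n hb0 (le_of_lt hbn), PySem.List.pyRange_one_cons hbn]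
  have hcongr : ∀ load' : List Int, pvPairs load' n =
      (PySem.List.pyRange 0 b 1).map (fun x => (PySem.List.pyGetD load' x 0, x))
      ++ (PySem.List.pyGetD load' b 0, b)
      :: (PySem.List.pyRange (b + 1) n 1).map (fun x => (PySem.List.pyGetD load' x 0, x)) := by
    intro load'
    rw [pvPairs, hsplit, List.map_append, List.map_cons]
  have hR1 : (PySem.List.pyRange 0 b 1).map
        (fun x => (PySem.List.pyGetD (PySem.List.pySetD load b v) x 0, x))
      = (PySem.List.pyRange 0 b 1).map (fun x => (PySem.List.pyGetD load x 0, x)) := by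
    apply List.map_congr_left
    intro x hx
    obtain ⟨hx0, hxb⟩ := PySem.List.mem_pyRange_one.mp hx
    rw [hget' x hx0 (by omega), if_neg (by omega)]
  have hR2 : (PySem.List.pyRange (b + 1) n 1).map
        (fun x => (PySem.List.pyGetD (PySem.List.pySetD load b v) x 0, x))
      = (PySem.List.pyRange (b + 1) n 1).map (fun x => (PySem.List.pyGetD load x 0, x)) := by
    apply List.map_congr_left
    intro x hx
    obtain ⟨hx0, hxn⟩ := PySem.List.mem_pyRange_one.mp hx
    rw [hget' x (by omega) hxn, if_neg (by omega)]
  have hgb : PySem.List.pyGetD (PySem.List.pySetD load b v) b 0 = v := by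
    rw [hget' b hb0 hbn, if_pos rfl]
  -- pairs of the updated load
  have hpairs' : pvPairs (PySem.List.pySetD load b v) n =
      (PySem.List.pyRange 0 b 1).map (fun x => (PySem.List.pyGetD load x 0, x))
      ++ (v, b) :: (PySem.List.pyRange (b + 1) n 1).map (fun x => (PySem.List.pyGetD load x 0, x)) := by
    rw [hcongr, hR1, hR2, hgb]
  have hpairs : pvPairs load n =
      (PySem.List.pyRange 0 b 1).map (fun x => (PySem.List.pyGetD load x 0, x))
      ++ (c, b) :: (PySem.List.pyRange (b + 1) n 1).map (fun x => (PySem.List.pyGetD load x 0, x)) := by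
    rw [hcongr, ← hc]
  -- rest is a permutation of the other belts' pairs
  have hrest : rest.Perm
      ((PySem.List.pyRange 0 b 1).map (fun x => (PySem.List.pyGetD load x 0, x))
       ++ (PySem.List.pyRange (b + 1) n 1).map (fun x => (PySem.List.pyGetD load x 0, x))) := by
    apply List.Perm.cons_inv (a := (c, b))
    have hperm2 := hperm
    rw [hpairs] at hperm2
    exact hperm2.trans List.perm_middle
  have hpermnew : (pvInsPool (c + sz, b) rest).Perm (pvPairs (PySem.List.pySetD load b v) n) := by
    refine (pvInsPool_perm _ _).trans ?_
    rw [hpairs']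
    have hcv : c + sz = v := by rw [hv, hc]
    rw [hcv]
    exact (hrest.cons (v, b)).trans List.perm_middle.symm
  have hpwnew : (pvInsPool (c + sz, b) rest).Pairwise pvRel :=
    pvInsPool_pairwise (List.Pairwise.of_cons hpw) (fun p hp => hne p hp)
  exact ⟨hminr, hc, hlen', hpwnew, hpermnew⟩

theorem pv_loop (n : Int) (hn : 0 < n) (sizes : List (Int × Int)) :
    ∀ (qs : List (List Int)) (load : List Int) (pool : List (Int × Int)),
    load.length = n.toNat → pvInv load n pool →
    sizes.foldl (pvStepA n) (qs, load)
      = ((sizes.foldl pvStepB (qs, load, pool)).1, (sizes.foldl pvStepB (qs, load, pool)).2.1) := by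
  induction sizes with
  | nil => intro qs load pool _ _; rfl
  | cons p t ih =>
      intro qs load pool hlen hinv
      obtain ⟨hpw, hperm⟩ := hinv
      cases pool with
      | nil =>
          exfalso
          have h := hperm.length_eq
          rw [pvPairs_length] at h
          simp at h
          omega
      | cons hd rest =>
          obtain ⟨c, b⟩ := hd
          obtain ⟨hminr, hc, hlen', hinv'⟩ :=
            pv_step n hn load hlen c b rest ⟨hpw, hperm⟩ p.1
          rw [List.foldl_cons, List.foldl_cons]
          have hA : pvStepA n (qs, load) p =
              (PySem.List.pySetD qs b (PySem.List.pyGetD qs b [] ++ [p.2]),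
               PySem.List.pySetD load b (PySem.List.pyGetD load b 0 + p.1)) := by
            unfold pvStepA
            simp only
            rw [hminr]
          have hB : pvStepB (qs, load, (c, b) :: rest) p =
              (PySem.List.pySetD qs b (PySem.List.pyGetD qs b [] ++ [p.2]),
               PySem.List.pySetD load b (PySem.List.pyGetD load b 0 + p.1),
               pvInsPool (c + p.1, b) rest) := rfl
          rw [hA, hB]
          exact ih _ _ _ hlen' hinv'

-- ===== VERDICT (by name: the statement is the Claim_ definition above) =====
theorem queues_lpt_balance_spec : Claim_equal_queues_lpt_balance := by
  intro demands num_belts _hdom hpre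
  unfold Spec_queues_lpt_balance
  rcases hpre with rfl | hn
  · -- demands = []: no orders, both return the freshly initialised (qs, load)
    simp only [queues_lpt_balance, queues_lpt_balance_alt]
    rfl
  · -- at least one belt: the pool invariant carries the loop
    simp only [queues_lpt_balance, queues_lpt_balance_alt]
    refine pv_loop num_belts hn _ _ _ _ ?_ ?_
    · rw [PySem.List.pyRepeat_singleton]
      simp
    · constructor
      · refine List.Pairwise.map _ ?_ (PySem.List.pairwise_lt_pyRange_one 0 num_belts)
        intro a b h
        exact Or.inr ⟨rfl, h⟩
      · have hp0 : pvPairs (PySem.List.pyRepeat [0] num_belts) num_belts =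
            (PySem.List.pyRange 0 num_belts 1).map (fun b => ((0 : Int), b)) := by
          unfold pvPairs
          apply List.map_congr_left
          intro x hx
          obtain ⟨hx0, hxn⟩ := PySem.List.mem_pyRange_one.mp hx
          rw [PySem.List.pyRepeat_singleton]
          rw [PySem.List.pyGetD_eq_getElem _ _ hx0 (by simp; omega)]
          simp
        exact List.Perm.of_eq hp0.symm
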